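-- pv_equiv track=rewrite | github.com/cosetteke/Bioinformatics-Algorithm | 6list/bitcoins.py | optimal_actions
-- ===== SOURCE A (Python) =====
-- def optimal_actions(rate):
--     """
--     >>> optimal_actions([5, 11, 4, 2, 8, 10, 7, 4, 3, 6])
--     'BS-B-S--BS'
--     >>> optimal_actions((4, 2, 5, 11, 10, 4, 11, 7, 4, 11, 3, 11))
--     '-B-S-BS-BSBS'
--     >>> optimal_actions([10, 9, 9, 10, 10, 9, 1, 4, 9, 3, 5, 6, 10])
--     '--B-S-B-SB--S'
--     >>> optimal_actions((12, 4, 9, 5, 6, 7, 9, 9, 11, 7, 10))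
--     '-BSB----SBS'
--     >>> optimal_actions([10, 9, 8, 7, 6, 5, 4, 3, 2, 1])
--     '----------'
--     >>> optimal_actions((10, 4, 2, 4, 8, 12))
--     '--B--S'
--     """
--     action = ''
--     for i in range(len(rate) - 1):
--         if rate[i+1] > rate[i] and action.rfind('B') <= action.rfind('S'): # b和s都不存在 为-1
--             action += 'B'
--         elif rate[i+1] < rate[i] and action.rfind('B') > action.rfind('S'):
--             action += 'S'
--         else:
--             action += '-'
--     return action + 'S' if action.rfind('B') > action.rfind('S') else action+'-'
-- ===== SOURCE B (Python) =====
-- def optimal_actions(rate):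
--     # Transition-marking over the plateau-compressed sign sequence:
--     # prefill the answer with dashes, extract the strict moves once, and
--     # mark 'B'/'S' only where the move direction flips (buy at the start
--     # of a rising run, sell at the first fall after it).
--     body = ['-'] * (len(rate) - 1)
--     moves = [(i, b > a) for i, (a, b) in enumerate(zip(rate, rate[1:])) if b != a]
--     last = False
--     for i, up in moves:
--         if up != last:
--             body[i] = 'B' if up else 'S'
--             last = up
--     body.append('S' if last else '-')
--     return ''.join(body)
-- ===== Notes on version B (the rewrite author's own statement) =====
-- stated objective: alternative
-- what changed: Instead of A's append loop that rescans the growing action string with rfind at every step, B prefills a dash array, extracts the strict rate moves once with enumerate/zip, and marks only the direction flips of that plateau-compressed sign sequence ('B' where a rising run starts, 'S' at the first fall after it).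
import Mathlib
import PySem

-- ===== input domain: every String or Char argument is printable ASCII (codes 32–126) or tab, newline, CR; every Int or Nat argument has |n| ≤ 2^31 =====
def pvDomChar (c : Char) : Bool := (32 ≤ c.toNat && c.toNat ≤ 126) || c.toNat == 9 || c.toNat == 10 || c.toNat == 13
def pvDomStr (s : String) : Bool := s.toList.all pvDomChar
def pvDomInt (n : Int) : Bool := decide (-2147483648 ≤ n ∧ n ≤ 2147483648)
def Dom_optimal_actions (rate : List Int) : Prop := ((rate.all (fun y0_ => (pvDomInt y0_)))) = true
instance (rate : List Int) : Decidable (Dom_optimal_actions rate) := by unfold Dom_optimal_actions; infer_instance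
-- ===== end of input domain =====

-- B replaces A's rfind-rescanning append loop by prefilling a dash array and
-- marking only the direction flips of the strict-move list (objective: alternative).

-- ===== PORT A =====
-- Python str.rfind(c): index of the last occurrence of c, -1 if absent.
-- Exact for single-character needles, which is all A uses.
def pyRfind (cs : List Char) (c : Char) : Int :=
  match cs with
  | [] => -1
  | x :: xs =>
      let r := pyRfind xs c
      if r ≥ 0 then r + 1 else if x = c then 0 else -1

-- loop body of A (the action string is carried as List Char; exact)
def pvAStep (rate : List Int) (action : List Char) (i : Int) : List Char :=
  let ri  := PySem.List.pyGetD rate i 0        -- index always in range in A's loop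
  let ri1 := PySem.List.pyGetD rate (i + 1) 0
  if ri1 > ri ∧ pyRfind action 'B' ≤ pyRfind action 'S' then action ++ ['B']
  else if ri1 < ri ∧ pyRfind action 'B' > pyRfind action 'S' then action ++ ['S']
  else action ++ ['-']

def optimal_actions (rate : List Int) : String :=
  let action := (PySem.List.pyRange 0 ((rate.length : Int) - 1) 1).foldl (pvAStep rate) []
  if pyRfind action 'B' > pyRfind action 'S' then String.ofList (action ++ ['S'])
  else String.ofList (action ++ ['-'])

-- ===== PORT B =====
-- the list comprehension  [(i, b > a) for i, (a, b) in enumerate(zip(rate, rate[1:])) if b != a]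
def pvBMoves (ps : List (Int × Int)) (s : Int) : List (Int × Bool) :=
  ((PySem.List.enumerate ps s).filter (fun m => m.2.2 ≠ m.2.1)).map
    (fun m => (m.1, decide (m.2.2 > m.2.1)))

-- loop body of B; the index written is in range whenever Source B runs it, so pySetD is exact
def pvBStep (st : Bool × List Char) (m : Int × Bool) : Bool × List Char :=
  if m.2 ≠ st.1 then (m.2, PySem.List.pySetD st.2 m.1 (if m.2 then 'B' else 'S')) else st

def optimal_actions_alt (rate : List Int) : String :=
  let body := List.replicate (rate.length - 1) '-'     -- ['-'] * (len(rate)-1); Python's * with a negative count gives []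
  let st := (pvBMoves (rate.zip rate.tail) 0).foldl pvBStep (false, body)
  String.ofList (st.2 ++ [if st.1 then 'S' else '-'])

-- ===== PRECONDITION & SPEC =====
def Spec_optimal_actions (rate : List Int) (out : String) : Prop := out = optimal_actions_alt rate
instance (rate : List Int) (out : String) : Decidable (Spec_optimal_actions rate out) := by unfold Spec_optimal_actions; infer_instance

-- ===== CLAIM (what is proved, stated in full; the proofs are below) =====
def Claim_equal_optimal_actions : Prop := ∀ (rate : List Int), Dom_optimal_actions rate → Spec_optimal_actions rate (optimal_actions rate)

-- ===== LEMMAS AND PROOFS =====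

-- A's loop body, seen as a function of the pair (rate[i], rate[i+1])
def pvAStepP (action : List Char) (p : Int × Int) : List Char :=
  if p.2 > p.1 ∧ pyRfind action 'B' ≤ pyRfind action 'S' then action ++ ['B']
  else if p.2 < p.1 ∧ pyRfind action 'B' > pyRfind action 'S' then action ++ ['S']
  else action ++ ['-']

-- the common abstraction both ports are reduced to: a flag pass over the pairs
def flagChar (prev : Bool) (p : Int × Int) : Char :=
  if p.2 > p.1 ∧ prev = false then 'B' else if p.2 < p.1 ∧ prev = true then 'S' else '-'

def flagNext (prev : Bool) (p : Int × Int) : Bool :=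
  if p.2 > p.1 ∧ prev = false then true else if p.2 < p.1 ∧ prev = true then false else prev

def flagStep (st : Bool × List Char) (p : Int × Int) : Bool × List Char :=
  (flagNext st.1 p, st.2 ++ [flagChar st.1 p])

lemma pyRfind_lt_length (cs : List Char) (c : Char) : pyRfind cs c < cs.length := by
  induction cs with
  | nil => simp [pyRfind]
  | cons x xs ih =>
      simp only [pyRfind, List.length_cons]
      split_ifs <;> push_cast <;> omega

lemma pyRfind_append_single (cs : List Char) (c d : Char) :
    pyRfind (cs ++ [d]) c = if d = c then (cs.length : Int) else pyRfind cs c := by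
  induction cs with
  | nil => simp [pyRfind]
  | cons x xs ih =>
      have h := pyRfind_lt_length xs c
      simp only [List.cons_append, pyRfind, ih, List.length_cons]
      split_ifs <;> push_cast <;> omega

-- "currently holding", read off A's action string as A does
def holdOf (cs : List Char) : Bool := decide (pyRfind cs 'B' > pyRfind cs 'S')

lemma holdOf_B (cs : List Char) : holdOf (cs ++ ['B']) = true := by
  have h := pyRfind_lt_length cs 'S'
  simp [holdOf, pyRfind_append_single]
  omega

lemma holdOf_S (cs : List Char) : holdOf (cs ++ ['S']) = false := by
  have h := pyRfind_lt_length cs 'B'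
  simp [holdOf, pyRfind_append_single]
  omega

lemma holdOf_dash (cs : List Char) : holdOf (cs ++ ['-']) = holdOf cs := by
  simp only [holdOf, pyRfind_append_single]
  rw [if_neg (by decide : ¬('-' = 'B')), if_neg (by decide : ¬('-' = 'S'))]

-- A's index loop reads exactly the adjacent pairs of rate.
lemma pairs_eq (rate : List Int) :
    (PySem.List.pyRange 0 ((rate.length : Int) - 1) 1).map
      (fun i => (PySem.List.pyGetD rate i 0, PySem.List.pyGetD rate (i + 1) 0))
      = rate.zip rate.tail := by
  rw [PySem.List.pyRange_one]
  apply List.ext_getElem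
  · simp
  · intro k h1 h2
    simp only [List.getElem_map, List.getElem_range, List.getElem_zip]
    simp only [List.length_map, List.length_range] at h1
    have hk : k < rate.length - 1 := by omega
    have e1 : PySem.List.pyGetD rate (0 + (k : Int)) 0 = rate[k]'(by omega) := by
      rw [zero_add, PySem.List.pyGetD_natCast rate k 0, List.getD_eq_getElem rate 0 (by omega)]
    have e2 : PySem.List.pyGetD rate (0 + (k : Int) + 1) 0 = rate[k + 1]'(by omega) := by
      rw [zero_add, (by push_cast; ring : ((k : Int) + 1) = ((k + 1 : Nat) : Int)),
        PySem.List.pyGetD_natCast rate (k + 1) 0, List.getD_eq_getElem rate 0 (by omega)]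
    rw [e1, e2]
    congr 1
    rw [List.getElem_tail]

-- A-side invariant: the flag pass carries (holdOf action, action) alongside A's fold.
lemma loop_inv (ps : List (Int × Int)) (action : List Char) :
    ps.foldl flagStep (holdOf action, action)
      = (holdOf (ps.foldl pvAStepP action), ps.foldl pvAStepP action) := by
  induction ps generalizing action with
  | nil => simp
  | cons p ps ih =>
      simp only [List.foldl_cons]
      have hcond : (holdOf action = false) ↔ (pyRfind action 'B' ≤ pyRfind action 'S') := by
        simp [holdOf]
      have hcond2 : (holdOf action = true) ↔ (pyRfind action 'B' > pyRfind action 'S') := by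
        simp [holdOf]
      by_cases h1 : p.2 > p.1 ∧ holdOf action = false
      · rw [show flagStep (holdOf action, action) p = (true, action ++ ['B']) from by
            simp only [flagStep, flagChar, flagNext]; rw [if_pos h1, if_pos h1],
          show pvAStepP action p = action ++ ['B'] from by
            simp only [pvAStepP]; rw [if_pos ⟨h1.1, hcond.mp h1.2⟩]]
        have := ih (action ++ ['B'])
        rwa [holdOf_B] at this
      · by_cases h2 : p.2 < p.1 ∧ holdOf action = true
        · rw [show flagStep (holdOf action, action) p = (false, action ++ ['S']) from by
              simp only [flagStep, flagChar, flagNext]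
              rw [if_neg h1, if_pos h2, if_neg h1, if_pos h2],
            show pvAStepP action p = action ++ ['S'] from by
              simp only [pvAStepP]
              rw [if_neg (by rw [← hcond] at *; exact h1), if_pos ⟨h2.1, hcond2.mp h2.2⟩]]
          have := ih (action ++ ['S'])
          rwa [holdOf_S] at this
        · rw [show flagStep (holdOf action, action) p = (holdOf action, action ++ ['-']) from by
              simp only [flagStep, flagChar, flagNext]
              rw [if_neg h1, if_neg h2, if_neg h1, if_neg h2],
            show pvAStepP action p = action ++ ['-'] from by
              simp only [pvAStepP]
              rw [if_neg (by rw [← hcond] at *; exact h1),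
                if_neg (by rw [← hcond2] at *; exact h2)]]
          have := ih (action ++ ['-'])
          rwa [holdOf_dash] at this

-- writing into the first '-' after the finished prefix
lemma set_append_len (done rest : List Char) (d c : Char) :
    (done ++ d :: rest).set done.length c = done ++ c :: rest := by
  induction done with
  | nil => simp
  | cons x xs ih => simp [ih]

-- B writes its mark into the first '-' after the finished prefix
lemma bstep_flip (done rest : List Char) (up prev : Bool) (h : up ≠ prev) :
    pvBStep (prev, done ++ '-' :: rest) ((done.length : Int), up)
      = (up, (done ++ [if up then 'B' else 'S']) ++ rest) := by
  simp only [pvBStep]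
  rw [if_pos h, PySem.List.pySetD_natCast, set_append_len]
  simp

lemma bstep_skip (done rest : List Char) (prev : Bool) (i : Int) :
    pvBStep (prev, done ++ '-' :: rest) (i, prev) = (prev, (done ++ ['-']) ++ rest) := by
  simp [pvBStep]

-- B-side invariant: the moves fold over a prefilled dash tail equals the flag pass.
lemma b_inv (ps : List (Int × Int)) (done : List Char) (prev : Bool) :
    (pvBMoves ps (done.length : Int)).foldl pvBStep (prev, done ++ List.replicate ps.length '-')
      = ps.foldl flagStep (prev, done) := by
  induction ps generalizing done prev with
  | nil => simp [pvBMoves, PySem.List.enumerate_nil]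
  | cons p t ih =>
      have hmoves : pvBMoves (p :: t) (done.length : Int)
          = (if p.2 ≠ p.1 then [((done.length : Int), decide (p.2 > p.1))] else [])
            ++ pvBMoves t ((done.length : Int) + 1) := by
        simp only [pvBMoves, PySem.List.enumerate_cons, List.filter_cons]
        by_cases h : p.2 ≠ p.1
        · rw [if_pos h, if_pos (by simpa using h)]
          simp
        · rw [if_neg h, if_neg (by simpa using h)]
          simp
      have hidx : ∀ c : Char, ((done.length : Int) + 1) = (((done ++ [c]).length : Nat) : Int) := by
        intro c; simp
      rw [List.foldl_cons, hmoves, List.length_cons, List.replicate_succ]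
      by_cases hgt : p.2 > p.1
      · rw [if_pos (by omega : p.2 ≠ p.1), decide_eq_true hgt,
          List.singleton_append, List.foldl_cons]
        cases prev with
        | false =>
            rw [bstep_flip done _ true false (by simp)]
            rw [show (if true then 'B' else 'S') = 'B' from rfl, hidx 'B', ih (done ++ ['B']) true,
              show flagStep (false, done) p = (true, done ++ ['B']) from by
                simp [flagStep, flagChar, flagNext, hgt]]
        | true =>
            rw [show pvBStep (true, done ++ '-' :: List.replicate t.length '-')
                  ((done.length : Int), true)
                  = (true, (done ++ ['-']) ++ List.replicate t.length '-') from
                bstep_skip done _ true _,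
              hidx '-', ih (done ++ ['-']) true,
              show flagStep (true, done) p = (true, done ++ ['-']) from by
                simp [flagStep, flagChar, flagNext]
                omega]
      · by_cases hlt : p.2 < p.1
        · rw [if_pos (by omega : p.2 ≠ p.1), decide_eq_false hgt,
            List.singleton_append, List.foldl_cons]
          cases prev with
          | true =>
              rw [bstep_flip done _ false true (by simp)]
              rw [show (if false then 'B' else 'S') = 'S' from rfl, hidx 'S',
                ih (done ++ ['S']) false,
                show flagStep (true, done) p = (false, done ++ ['S']) from by
                  simp [flagStep, flagChar, flagNext, hgt, hlt]]
          | false =>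
              rw [show pvBStep (false, done ++ '-' :: List.replicate t.length '-')
                    ((done.length : Int), false)
                    = (false, (done ++ ['-']) ++ List.replicate t.length '-') from
                  bstep_skip done _ false _,
                hidx '-', ih (done ++ ['-']) false,
                show flagStep (false, done) p = (false, done ++ ['-']) from by
                  simp [flagStep, flagChar, flagNext, hgt]]
        · rw [if_neg (by omega : ¬ p.2 ≠ p.1), List.nil_append,
            show done ++ '-' :: List.replicate t.length '-'
              = (done ++ ['-']) ++ List.replicate t.length '-' from by simp,
            hidx '-', ih (done ++ ['-']) prev,
            show flagStep (prev, done) p = (prev, done ++ ['-']) from by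
              simp [flagStep, flagChar, flagNext, hgt, hlt]]

-- ===== VERDICT (by name: the statement is the Claim_ definition above) =====
theorem optimal_actions_spec : Claim_equal_optimal_actions := by
  intro rate _
  unfold Spec_optimal_actions
  simp only [optimal_actions, optimal_actions_alt]
  have hA : (PySem.List.pyRange 0 ((rate.length : Int) - 1) 1).foldl (pvAStep rate) []
      = (rate.zip rate.tail).foldl pvAStepP [] := by
    rw [← pairs_eq rate, List.foldl_map]
    rfl
  have hlen : rate.length - 1 = (rate.zip rate.tail).length := by
    simp [List.length_zip]
  have hB := b_inv (rate.zip rate.tail) [] false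
  simp only [List.length_nil, Nat.cast_zero, List.nil_append] at hB
  have h0 : holdOf ([] : List Char) = false := by decide
  have hflag := loop_inv (rate.zip rate.tail) []
  rw [h0] at hflag
  rw [hA, hlen, hB, hflag]
  by_cases h : pyRfind ((rate.zip rate.tail).foldl pvAStepP []) 'B'
      > pyRfind ((rate.zip rate.tail).foldl pvAStepP []) 'S' <;>
    simp [holdOf, h]
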